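-- pv_equiv track=rewrite | github.com/bendinglee/mythiq-media-creator | audio_generator.py | _determine_duration
-- ===== SOURCE A (Python) =====
-- from typing import Dict, List, Tuple, Optional
--
-- def _determine_duration(keywords: List[str], prompt: str, complexity: str) -> int:
--     """Determine audio duration in seconds"""
--     prompt_lower = prompt.lower()
--
--     # Check for explicit duration keywords
--     if any(word in prompt_lower for word in ['short', 'brief', 'quick']):
--         return 10
--     elif any(word in prompt_lower for word in ['long', 'extended']):
--         return 60
--     elif any(word in prompt_lower for word in ['loop', 'background']):
--         return 30
--
--     # Base on complexity and type
--     if complexity == 'simple':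
--         return 15
--     elif complexity == 'detailed':
--         return 45
--     elif complexity == 'professional':
--         return 60
--
--     return 30  # Default
-- ===== SOURCE B (Python) =====
-- # Flat rule list in priority order; each rule is (kind, key, duration):
-- # 'sub' rules test substring membership in the lowered prompt, 'comp' rules
-- # test exact equality with complexity.  Evaluated by a single reverse fold:
-- # start from the default 30 and walk the rules from lowest to highest
-- # priority, overwriting the accumulator on every match, so the highest-
-- # priority (earliest) matching rule determines the final value -- no early
-- # return at all.  Flattening keyword groups is sound because every keyword
-- # in a group carries the same duration.
-- _RULES = [
--     ('sub', 'short', 10),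
--     ('sub', 'brief', 10),
--     ('sub', 'quick', 10),
--     ('sub', 'long', 60),
--     ('sub', 'extended', 60),
--     ('sub', 'loop', 30),
--     ('sub', 'background', 30),
--     ('comp', 'simple', 15),
--     ('comp', 'detailed', 45),
--     ('comp', 'professional', 60),
-- ]
--
-- def _determine_duration(keywords, prompt, complexity):
--     """Determine audio duration in seconds (reverse-fold over a flat rule list)."""
--     p = prompt.lower()
--     duration = 30
--     for kind, key, d in reversed(_RULES):
--         if (key in p) if kind == 'sub' else (complexity == key):
--             duration = d
--     return duration
-- ===== Notes on version B (the rewrite author's own statement) =====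
-- stated objective: alternative
-- what changed: Replaces the two early-return if/elif cascades with a single reverse fold over one flat priority-ordered (kind, key, duration) rule list: start from the default 30 and overwrite the accumulator on every matching rule from lowest to highest priority, so the earliest matching rule wins without any early return.
import Mathlib
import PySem

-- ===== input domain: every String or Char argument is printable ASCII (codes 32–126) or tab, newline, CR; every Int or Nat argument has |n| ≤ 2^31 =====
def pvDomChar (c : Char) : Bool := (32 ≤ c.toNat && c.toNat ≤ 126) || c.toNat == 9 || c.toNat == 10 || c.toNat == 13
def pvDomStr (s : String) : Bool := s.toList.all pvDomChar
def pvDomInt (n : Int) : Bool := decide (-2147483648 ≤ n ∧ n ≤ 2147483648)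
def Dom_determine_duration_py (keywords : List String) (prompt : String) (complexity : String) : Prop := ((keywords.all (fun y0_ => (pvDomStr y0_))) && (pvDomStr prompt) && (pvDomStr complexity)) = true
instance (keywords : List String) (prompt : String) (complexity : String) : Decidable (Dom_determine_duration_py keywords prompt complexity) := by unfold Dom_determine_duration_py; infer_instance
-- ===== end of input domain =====

-- ===== PORT A =====
-- B replaces the early-return if/elif cascades by one reverse fold over a flat priority-ordered rule list (objective: alternative)
def determine_duration_py (keywords : List String) (prompt : String) (complexity : String) : Int :=
  let prompt_lower := PySem.Str.lower prompt
  if ["short", "brief", "quick"].any (fun word => PySem.Str.isIn word prompt_lower) then 10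
  else if ["long", "extended"].any (fun word => PySem.Str.isIn word prompt_lower) then 60
  else if ["loop", "background"].any (fun word => PySem.Str.isIn word prompt_lower) then 30
  else if complexity == "simple" then 15
  else if complexity == "detailed" then 45
  else if complexity == "professional" then 60
  else 30

-- ===== PORT B =====
def ddRules : List (String × String × Int) :=
  [("sub", "short", 10), ("sub", "brief", 10), ("sub", "quick", 10),
   ("sub", "long", 60), ("sub", "extended", 60),
   ("sub", "loop", 30), ("sub", "background", 30),
   ("comp", "simple", 15), ("comp", "detailed", 45), ("comp", "professional", 60)]

def determine_duration_py_alt (keywords : List String) (prompt : String) (complexity : String) : Int :=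
  let p := PySem.Str.lower prompt
  ddRules.reverse.foldl
    (fun duration r =>
      if (if r.1 == "sub" then PySem.Str.isIn r.2.1 p else complexity == r.2.1)
      then r.2.2 else duration)
    30

-- ===== PRECONDITION & SPEC =====
def Spec_determine_duration_py (keywords : List String) (prompt : String) (complexity : String) (out : Int) : Prop := out = determine_duration_py_alt keywords prompt complexity
instance (keywords : List String) (prompt : String) (complexity : String) (out : Int) : Decidable (Spec_determine_duration_py keywords prompt complexity out) := by unfold Spec_determine_duration_py; infer_instance

-- ===== CLAIM (what is proved, stated in full; the proofs are below) =====
def Claim_equal_determine_duration_py : Prop := ∀ (keywords : List String) (prompt : String) (complexity : String), Dom_determine_duration_py keywords prompt complexity → Spec_determine_duration_py keywords prompt complexity (determine_duration_py keywords prompt complexity)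

-- ===== LEMMAS AND PROOFS =====

-- ===== VERDICT (by name: the statement is the Claim_ definition above) =====
theorem determine_duration_py_spec : Claim_equal_determine_duration_py := by
  intro keywords prompt complexity _
  unfold Spec_determine_duration_py determine_duration_py determine_duration_py_alt ddRules
  simp only [List.reverse, List.reverseAux, List.foldl, List.any_cons, List.any_nil]
  simp only [show (("sub":String) == "sub") = true from rfl, show (("comp":String) == "sub") = false from rfl, if_true, Bool.false_eq_true, if_false, Bool.or_false]
  generalize PySem.Str.isIn "short" (PySem.Str.lower prompt) = b1
  generalize PySem.Str.isIn "brief" (PySem.Str.lower prompt) = b2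
  generalize PySem.Str.isIn "quick" (PySem.Str.lower prompt) = b3
  generalize PySem.Str.isIn "long" (PySem.Str.lower prompt) = b4
  generalize PySem.Str.isIn "extended" (PySem.Str.lower prompt) = b5
  generalize PySem.Str.isIn "loop" (PySem.Str.lower prompt) = b6
  generalize PySem.Str.isIn "background" (PySem.Str.lower prompt) = b7
  generalize (complexity == "simple") = c1
  generalize (complexity == "detailed") = c2
  generalize (complexity == "professional") = c3
  revert b1 b2 b3 b4 b5 b6 b7 c1 c2 c3
  decide
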